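-- pv_equiv track=rewrite | github.com/ankitmaloo/nanoevolve | alphaevolve/mvp/evolve_blocks.py | find_evolve_blocks
-- ===== SOURCE A (Python) =====
-- START_MARKER = "# EVOLVE-BLOCK-START"
--
-- END_MARKER = "# EVOLVE-BLOCK-END"
--
-- class EvolveBlockError(ValueError):
--     pass
--
-- def find_evolve_blocks(source: str) -> list[tuple[int, int, str]]:
--     """Return (start_line, end_line, block_text) for every evolve block."""
--     lines = source.splitlines()
--     blocks: list[tuple[int, int, str]] = []
--     current_start: int | None = None
--     current_lines: list[str] = []
--
--     for idx, line in enumerate(lines, start=1):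
--         if START_MARKER in line:
--             if current_start is not None:
--                 raise EvolveBlockError("Nested EVOLVE-BLOCK-START markers are not allowed.")
--             current_start = idx
--             current_lines = []
--             continue
--         if END_MARKER in line:
--             if current_start is None:
--                 raise EvolveBlockError("Found EVOLVE-BLOCK-END without a matching start.")
--             blocks.append((current_start, idx, "\n".join(current_lines)))
--             current_start = None
--             current_lines = []
--             continue
--         if current_start is not None:
--             current_lines.append(line)
--
--     if current_start is not None:
--         raise EvolveBlockError("Unclosed EVOLVE-BLOCK-START marker.")
--     return blocks
-- ===== SOURCE B (Python) =====
-- START_MARKER = "# EVOLVE-BLOCK-START"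
--
-- END_MARKER = "# EVOLVE-BLOCK-END"
--
-- class EvolveBlockError(ValueError):
--     pass
--
-- def find_evolve_blocks(source: str) -> list[tuple[int, int, str]]:
--     """Return (start_line, end_line, block_text) for every evolve block."""
--     lines = source.splitlines()
--     # pass 1: record every marker line (1-based line number, is_start); START wins on a line with both
--     markers = [(i, START_MARKER in line)
--                for i, line in enumerate(lines, start=1)
--                if START_MARKER in line or END_MARKER in line]
--     # pass 2: pair the markers, recovering each block's text by slicing the original lines
--     blocks: list[tuple[int, int, str]] = []
--     pending: int | None = None
--     for i, is_start in markers: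
--         if is_start:
--             if pending is not None:
--                 raise EvolveBlockError("Nested EVOLVE-BLOCK-START markers are not allowed.")
--             pending = i
--         else:
--             if pending is None:
--                 raise EvolveBlockError("Found EVOLVE-BLOCK-END without a matching start.")
--             blocks.append((pending, i, "\n".join(lines[pending:i - 1])))
--             pending = None
--     if pending is not None:
--         raise EvolveBlockError("Unclosed EVOLVE-BLOCK-START marker.")
--     return blocks
-- ===== Notes on version B (the rewrite author's own statement) =====
-- stated objective: alternative
-- what changed: B replaces A's single loop with a per-line text accumulator by a two-pass decomposition: first collect the marker lines as (line_number, kind) records, then pair consecutive start/end markers and recover each block's text by slicing the original lines (lines[start:end-1]) instead of accumulating it line by line.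
import Mathlib
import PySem

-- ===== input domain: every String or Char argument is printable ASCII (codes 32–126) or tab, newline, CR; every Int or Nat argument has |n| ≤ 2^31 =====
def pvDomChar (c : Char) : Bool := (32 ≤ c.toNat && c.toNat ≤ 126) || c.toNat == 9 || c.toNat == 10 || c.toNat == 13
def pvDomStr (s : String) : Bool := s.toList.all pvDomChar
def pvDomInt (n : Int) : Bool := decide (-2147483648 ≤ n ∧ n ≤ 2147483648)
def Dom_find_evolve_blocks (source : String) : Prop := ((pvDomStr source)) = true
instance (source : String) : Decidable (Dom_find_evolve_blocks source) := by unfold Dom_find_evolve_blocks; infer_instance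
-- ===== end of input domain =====

-- B replaces A's per-line text accumulator by a two-pass decomposition: collect the marker
-- lines first, then pair them, recovering each block's text by slicing the original lines
-- (objective: alternative decomposition, same cost).

def pvStartMarker : String := "# EVOLVE-BLOCK-START"
def pvEndMarker : String := "# EVOLVE-BLOCK-END"

-- ===== PORT A =====
-- A's single loop over enumerate(lines, 1): state = (blocks, current_start, current_lines).
-- On the paths where Python raises EvolveBlockError (nested start, end without start,
-- unclosed start) the port returns the accumulated blocks; Pre_ excludes those inputs.
def pvLoopA : List (Int × String) → List (Int × Int × String) → Option Int → List String → List (Int × Int × String)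
  | [], blocks, _, _ => blocks
  | (i, line) :: rest, blocks, cs, cl =>
    if PySem.Str.isIn pvStartMarker line then
      match cs with
      | some _ => blocks          -- raise: nested start
      | none => pvLoopA rest blocks (some i) []
    else if PySem.Str.isIn pvEndMarker line then
      match cs with
      | none => blocks            -- raise: end without start
      | some s => pvLoopA rest (blocks ++ [(s, i, PySem.Str.join "\n" cl)]) none []
    else if cs.isSome then pvLoopA rest blocks cs (cl ++ [line])
    else pvLoopA rest blocks cs cl

def find_evolve_blocks (source : String) : List (Int × Int × String) :=
  let lines := PySem.Str.splitlines source
  pvLoopA (PySem.List.enumerate lines 1) [] none []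

-- ===== PORT B =====
-- pass 1: the marker records (line number, is_start); START is tested first, as in Source B
def pvKind (p : Int × String) : Option (Int × Bool) :=
  if PySem.Str.isIn pvStartMarker p.2 then some (p.1, true)
  else if PySem.Str.isIn pvEndMarker p.2 then some (p.1, false)
  else none

-- pass 2: pair the markers; block text = "\n".join(lines[pending:i-1])
def pvLoopB (lines : List String) : List (Int × Bool) → List (Int × Int × String) → Option Int → List (Int × Int × String)
  | [], blocks, _ => blocks
  | (i, isStart) :: rest, blocks, pending =>
    if isStart then
      match pending with
      | some _ => blocks          -- raise: nested start
      | none => pvLoopB lines rest blocks (some i)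
    else
      match pending with
      | none => blocks            -- raise: end without start
      | some s =>
          pvLoopB lines rest
            (blocks ++ [(s, i, PySem.Str.join "\n" (PySem.List.slice lines (some s) (some (i - 1))))]) none

def find_evolve_blocks_alt (source : String) : List (Int × Int × String) :=
  let lines := PySem.Str.splitlines source
  pvLoopB lines ((PySem.List.enumerate lines 1).filterMap pvKind) [] none

-- ===== PRECONDITION & SPEC =====
-- pvAlt expectStart kinds = true iff the marker kinds alternate START,END,START,END,… and end closed
def pvAlt : Bool → List Bool → Bool
  | expectStart, [] => expectStart
  | true, b :: r => b && pvAlt false r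
  | false, b :: r => !b && pvAlt true r

-- Pre_ excludes exactly the inputs on which Python A raises EvolveBlockError: the marker
-- lines must alternate START, END, START, END, … with every START closed.
def Pre_find_evolve_blocks (source : String) : Prop :=
  pvAlt true (((PySem.List.enumerate (PySem.Str.splitlines source) 1).filterMap pvKind).map (·.2)) = true
instance (source : String) : Decidable (Pre_find_evolve_blocks source) := by
  unfold Pre_find_evolve_blocks; infer_instance

def pvWitness_find_evolve_blocks : String :=
  "a\n# EVOLVE-BLOCK-START\nx\ny\n# EVOLVE-BLOCK-END\nb"

def Spec_find_evolve_blocks (source : String) (out : List (Int × Int × String)) : Prop := out = find_evolve_blocks_alt source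
instance (source : String) (out : List (Int × Int × String)) : Decidable (Spec_find_evolve_blocks source out) := by unfold Spec_find_evolve_blocks; infer_instance

-- ===== CLAIM (what is proved, stated in full; the proofs are below) =====
def Claim_equal_find_evolve_blocks : Prop := ∀ (source : String), Dom_find_evolve_blocks source → Pre_find_evolve_blocks source → Spec_find_evolve_blocks source (find_evolve_blocks source)

-- ===== LEMMAS AND PROOFS =====

-- extending the between-lines slice by the line at position m (0-based)
lemma pvSlice_snoc (L : List String) (s m : Nat) (l : String)
    (hsm : s ≤ m) (hm : L[m]? = some l) :
    PySem.List.slice L (some (s : Int)) (some (m : Int)) ++ [l] =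
      PySem.List.slice L (some (s : Int)) (some ((m : Int) + 1)) := by
  have h1 : ((m : Int) + 1) = ((m + 1 : Nat) : Int) := by push_cast; ring
  rw [h1, PySem.List.slice_natCast, PySem.List.slice_natCast]
  have hdrop : (L.drop s)[m - s]? = some l := by
    rw [List.getElem?_drop]; rwa [Nat.add_sub_cancel' hsm]
  have h2 : m + 1 - s = (m - s) + 1 := by omega
  rw [h2, List.take_add_one, hdrop]
  rfl

-- the core invariant: A's loop on the suffix of the enumeration equals B's loop on the
-- filtered markers of that suffix, with A's accumulated lines equal to a slice of L
lemma pvLoop_eq (L : List String) :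
    ∀ (suf pre : List String), L = pre ++ suf →
    ∀ blocks : List (Int × Int × String),
      (pvLoopA (PySem.List.enumerate suf ((pre.length : Int) + 1)) blocks none [] =
        pvLoopB L ((PySem.List.enumerate suf ((pre.length : Int) + 1)).filterMap pvKind) blocks none)
      ∧ (∀ s : Nat, 1 ≤ s → s ≤ pre.length →
        pvLoopA (PySem.List.enumerate suf ((pre.length : Int) + 1)) blocks (some (s : Int))
            (PySem.List.slice L (some (s : Int)) (some (pre.length : Int))) =
          pvLoopB L ((PySem.List.enumerate suf ((pre.length : Int) + 1)).filterMap pvKind) blocks (some (s : Int))) := by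
  intro suf
  induction suf with
  | nil => intro pre hL blocks; simp [PySem.List.enumerate_nil, pvLoopA, pvLoopB]
  | cons l suf' ih =>
    intro pre hL blocks
    have hL' : L = (pre ++ [l]) ++ suf' := by simp [hL]
    have hlen' : (((pre ++ [l]).length : Int)) + 1 = ((pre.length : Int) + 1) + 1 := by
      simp only [List.length_append, List.length_singleton]; push_cast; ring
    have ihspec := ih (pre ++ [l]) hL'
    rw [hlen'] at ihspec
    have hget : L[pre.length]? = some l := by
      rw [hL]; rw [List.getElem?_append_right (le_refl _)]; simp
    constructor
    · -- state: no open block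
      rw [PySem.List.enumerate_cons]
      by_cases hS : PySem.Chars.isIn pvStartMarker.toList l.toList = true
      · -- START line: open a block at index pre.length + 1
        have hthis := (ihspec blocks).2 (pre.length + 1) (by omega) (by simp)
        rw [PySem.List.slice_natCast] at hthis
        simp only [List.length_append, List.length_singleton, Nat.sub_self, List.take_zero] at hthis
        push_cast at hthis
        simp only [pvLoopA, pvLoopB, List.filterMap_cons, pvKind, PySem.Str.isIn_eq, hS, if_true]
        exact hthis
      · by_cases hE : PySem.Chars.isIn pvEndMarker.toList l.toList = true
        · -- END with no open block: both return blocks (Python raises)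
          simp [pvLoopA, pvLoopB, pvKind, PySem.Str.isIn_eq, hS, hE]
        · -- plain line, skipped by both
          have hthis := (ihspec blocks).1
          push_cast at hthis
          simp only [pvLoopA, List.filterMap_cons, pvKind, PySem.Str.isIn_eq, hS, hE]
          simpa using hthis
    · -- state: open block started at line s
      intro s hs1 hs2
      rw [PySem.List.enumerate_cons]
      by_cases hS : PySem.Chars.isIn pvStartMarker.toList l.toList = true
      · -- nested START: both return blocks (Python raises)
        simp [pvLoopA, pvLoopB, pvKind, PySem.Str.isIn_eq, hS]
      · by_cases hE : PySem.Chars.isIn pvEndMarker.toList l.toList = true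
        · -- END: both append (s, pre.length+1, text); A joins its accumulator, B the slice
          have hend : (pre.length : Int) + 1 - 1 = (pre.length : Int) := by ring
          have hthis := (ihspec (blocks ++ [((s : Int), (pre.length : Int) + 1,
            PySem.Str.join "\n" (PySem.List.slice L (some (s : Int)) (some (pre.length : Int))))])).1
          push_cast at hthis
          simp only [pvLoopA, List.filterMap_cons, pvKind, PySem.Str.isIn_eq, hS, hE]
          simpa [pvLoopB, hend] using hthis
        · -- plain line: A appends it to the accumulator; = extending the slice by one
          have hsnoc := pvSlice_snoc L s pre.length l (by omega) hget
          have hthis := (ihspec blocks).2 s hs1 (by simp; omega)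
          simp only [List.length_append, List.length_singleton] at hthis
          push_cast at hthis
          simp only [pvLoopA, List.filterMap_cons, pvKind, PySem.Str.isIn_eq, hS, hE,
            Option.isSome_some]
          rw [hsnoc]
          push_cast
          simpa using hthis

-- ===== VERDICT (by name: the statement is the Claim_ definition above) =====
theorem find_evolve_blocks_spec : Claim_equal_find_evolve_blocks := by
  intro source _ _
  unfold Spec_find_evolve_blocks find_evolve_blocks find_evolve_blocks_alt
  have h := (pvLoop_eq (PySem.Str.splitlines source) (PySem.Str.splitlines source) [] (by simp) []).1
  simpa using h
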